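-- pv_equiv track=rewrite | github.com/AdamZhouSE/pythonHomework | Code/CodeRecords/2326/60605/253167.py | delZero
-- ===== SOURCE A (Python) =====
-- def delZero(li) -> [int]:
--     newli = []
--     isNotZero = False
--     for i in li:
--         if not isNotZero and i == 0: continue
--         if not isNotZero and i != 0:
--             newli.append(i)
--             isNotZero = True
--         else:
--             newli.append(i)
--     return newli
-- ===== SOURCE B (Python) =====
-- def delZero(li) -> [int]:
--     idx = next((i for i, x in enumerate(li) if x != 0), None)
--     if idx is None:
--         return []
--     return li[idx:]
-- ===== Notes on version B (the rewrite author's own statement) =====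
-- stated objective: simpler
-- what changed: Replaces the flag-tracking append loop with locate-first-nonzero-then-slice (next over enumerate, then li[idx:]).
import Mathlib
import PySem

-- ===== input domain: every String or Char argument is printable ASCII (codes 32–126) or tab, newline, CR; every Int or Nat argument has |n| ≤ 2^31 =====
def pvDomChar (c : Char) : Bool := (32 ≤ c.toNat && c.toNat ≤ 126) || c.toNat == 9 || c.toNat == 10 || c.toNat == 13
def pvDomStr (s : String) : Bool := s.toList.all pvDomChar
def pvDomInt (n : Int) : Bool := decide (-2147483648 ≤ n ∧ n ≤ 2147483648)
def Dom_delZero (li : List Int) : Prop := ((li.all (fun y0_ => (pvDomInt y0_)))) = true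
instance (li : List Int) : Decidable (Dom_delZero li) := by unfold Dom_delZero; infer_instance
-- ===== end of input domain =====

-- ===== PORT A =====
-- Loop with flag: once a nonzero is seen, everything is appended.
def delZeroLoop (rest : List Int) (newli : List Int) (isNotZero : Bool) : List Int :=
  match rest with
  | [] => newli
  | i :: t =>
    if !isNotZero && i == 0 then delZeroLoop t newli isNotZero
    else if !isNotZero && i != 0 then delZeroLoop t (newli ++ [i]) true
    else delZeroLoop t (newli ++ [i]) isNotZero

def delZero (li : List Int) : List Int := delZeroLoop li [] false

-- ===== PORT B =====
-- B: index of first nonzero (scan), then slice from there.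
def delZero_alt (li : List Int) : List Int :=
  match li.findIdx? (fun x => x != 0) with
  | none => []
  | some idx => li.drop idx

-- ===== PRECONDITION & SPEC =====
def Spec_delZero (li : List Int) (out : List Int) : Prop := out = delZero_alt li
instance (li : List Int) (out : List Int) : Decidable (Spec_delZero li out) := by unfold Spec_delZero; infer_instance

-- ===== CLAIM (what is proved, stated in full; the proofs are below) =====
def Claim_equal_delZero : Prop := ∀ (li : List Int), Dom_delZero li → Spec_delZero li (delZero li)

-- ===== LEMMAS AND PROOFS =====

-- ===== VERDICT (by name: the statement is the Claim_ definition above) =====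
lemma delZeroLoop_true (rest acc : List Int) : delZeroLoop rest acc true = acc ++ rest := by
  induction rest generalizing acc with
  | nil => simp [delZeroLoop]
  | cons i t ih => simp [delZeroLoop, ih]

lemma delZeroLoop_eq_alt (li : List Int) : delZeroLoop li [] false = delZero_alt li := by
  induction li with
  | nil => rfl
  | cons i t ih =>
    by_cases h : i = 0
    · subst h
      rw [show delZeroLoop (0 :: t) [] false = delZeroLoop t [] false from by simp [delZeroLoop]]
      rw [ih]
      unfold delZero_alt
      rw [List.findIdx?_cons]
      simp only [bne_self_eq_false]
      cases List.findIdx? (fun x => x != 0) t with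
      | none => simp
      | some idx => simp
    · have hne : (i != 0) = true := by simpa using h
      rw [show delZeroLoop (i :: t) [] false = delZeroLoop t [i] true from by
        simp [delZeroLoop, hne, h]]
      rw [delZeroLoop_true]
      unfold delZero_alt
      rw [List.findIdx?_cons]
      simp [hne]

-- ===== VERDICT (by name: the statement is the Claim_ definition above) =====
theorem delZero_spec : Claim_equal_delZero := by
  intro li _
  unfold Spec_delZero delZero
  exact delZeroLoop_eq_alt li
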